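-- pv_equiv track=rewrite | github.com/pypi-data/pypi-mirror-289 | packages/gaea-operator/gaea_operator-4.1.4-py3-none-any.whl/gaea_operator/utils/imdata.py | fold_row_major
-- ===== SOURCE A (Python) =====
-- def fold_row_major(data, keys=None, single=False):
--     r"""fold row majored `data`"""
--
--     if len(data) == 0 or (len(data) == 1 and not single): return (data, dict())
--     it = iter(data)
--     item = next(it)
--     meta_ = dict(item) if keys is None else {k: item[k] for k in keys}
--     for item in it:
--         for key in list(meta_):
--             if key not in item or meta_[key] != item[key]: meta_.pop(key)
--     data_ = [{k: v for k, v in i.items() if k not in meta_} for i in data]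
--     return (data_, meta_)
-- ===== SOURCE B (Python) =====
-- def fold_row_major(data, keys=None, single=False):
--     r"""fold row majored `data`"""
--     if len(data) == 0 or (len(data) == 1 and not single): return (data, dict())
--     first = data[0]
--     ks = list(first) if keys is None else list(dict.fromkeys(keys))
--     common = [k for k in ks if all(i.get(k) == first[k] for i in data[1:])]
--     meta_ = {k: first[k] for k in common}
--     data_ = [{k: v for k, v in i.items() if k not in common} for i in data]
--     return (data_, meta_)
-- ===== Notes on version B (the rewrite author's own statement) =====
-- stated objective: simpler
-- what changed: Replaces the item-major destructive loop that pops keys out of a mutated meta_ dict with a key-list pipeline: build the (deduplicated) candidate key list, keep a key iff every later item agrees with the first (all over data[1:]), then derive meta_ and the stripped rows from that key list; no dict mutation at all.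
import Mathlib
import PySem

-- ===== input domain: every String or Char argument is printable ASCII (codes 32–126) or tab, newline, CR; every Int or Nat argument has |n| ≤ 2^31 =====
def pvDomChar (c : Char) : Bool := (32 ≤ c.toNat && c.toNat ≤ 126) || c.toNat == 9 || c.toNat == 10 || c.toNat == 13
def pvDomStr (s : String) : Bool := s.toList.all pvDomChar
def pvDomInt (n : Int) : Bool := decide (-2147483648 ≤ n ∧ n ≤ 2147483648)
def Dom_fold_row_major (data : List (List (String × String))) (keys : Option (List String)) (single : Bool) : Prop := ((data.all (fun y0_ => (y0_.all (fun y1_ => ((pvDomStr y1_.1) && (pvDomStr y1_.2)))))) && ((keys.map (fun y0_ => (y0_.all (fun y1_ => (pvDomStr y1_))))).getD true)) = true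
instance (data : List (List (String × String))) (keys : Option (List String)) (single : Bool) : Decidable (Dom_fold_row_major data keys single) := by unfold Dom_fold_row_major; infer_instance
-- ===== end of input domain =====

-- B replaces A's item-major destructive key-popping loop by a key-list pipeline
-- (candidate key list, kept iff all later items agree with the first); return value only.
-- ===== PORT A =====
-- Python's `i[k]` / `k in i` on a dict, with the dict represented as its association list.
def pyLookup? (i : List (String × String)) (k : String) : Option String :=
  (i.find? (fun p => p.1 == k)).map (·.2)

def fold_row_major (data : List (List (String × String))) (keys : Option (List String)) (single : Bool) : (List (List (String × String))) × (List (String × String)) :=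
  if data.length = 0 ∨ (data.length = 1 ∧ single = false) then (data, [])
  else
    match data with
    | [] => (data, [])  -- unreachable: the guard above already returned for empty data
    | item :: rest =>
      -- meta_ = dict(item) if keys is None else {k: item[k] for k in keys}
      -- (item[k] raises KeyError on a missing key: Pre_ excludes that)
      let meta0 : PySem.Dict String String :=
        match keys with
        | none => PySem.Dict.mk item
        | some ks => ks.foldl (fun d k => d.insert k ((pyLookup? item k).getD "")) PySem.Dict.empty
      -- for item in it: for key in list(meta_): if key not in item or meta_[key] != item[key]: meta_.pop(key)
      let metaF := rest.foldl (fun m it =>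
        m.keys.foldl (fun m' key =>
          if !(it.any (fun p => p.1 == key)) || (m'.get? key != pyLookup? it key)
          then m'.erase key else m') m) meta0
      -- data_ = [{k: v for k, v in i.items() if k not in meta_} for i in data]
      let data_ := data.map (fun i => i.filter (fun p => !(metaF.contains p.1)))
      (data_, metaF.items)

-- ===== PORT B =====
-- list(dict.fromkeys(keys)): first-occurrence dedup, carrying the set of keys already seen
def pyFromKeysAux (seen : List String) : List String → List String
  | [] => []
  | k :: ks => if seen.contains k then pyFromKeysAux seen ks else k :: pyFromKeysAux (k :: seen) ks

def pyFromKeys (l : List String) : List String := pyFromKeysAux [] l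

def fold_row_major_alt (data : List (List (String × String))) (keys : Option (List String)) (single : Bool) : (List (List (String × String))) × (List (String × String)) :=
  if data.length = 0 ∨ (data.length = 1 ∧ single = false) then (data, [])
  else
    let first := data.headD []
    let ks := match keys with
      | none => first.map Prod.fst
      | some l => pyFromKeys l
    -- common = [k for k in ks if all(i.get(k) == first[k] for i in data[1:])]
    -- (`first[k]` raises KeyError when k is missing from first; Pre_ excludes that path,
    -- so comparing against `pyLookup? first k` is exact on the admitted inputs)
    let common := ks.filter (fun k => (data.drop 1).all (fun i => pyLookup? i k == pyLookup? first k))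
    let meta_ := common.map (fun k => (k, (pyLookup? first k).getD ""))
    let data_ := data.map (fun i => i.filter (fun p => !(common.contains p.1)))
    (data_, meta_)

-- ===== PRECONDITION & SPEC =====
-- Pre_ excludes association lists with duplicate keys inside an item (they do not represent
-- any Python dict input) and, on the non-early-return path, keys lists naming a key missing
-- from the first item, where both A and B raise KeyError.
def Pre_fold_row_major (data : List (List (String × String))) (keys : Option (List String)) (single : Bool) : Prop :=
  (∀ i ∈ data, (i.map Prod.fst).Nodup) ∧
  (keys = none ∨ data.length = 0 ∨ (data.length = 1 ∧ single = false) ∨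
    ∀ k ∈ keys.getD [], k ∈ (data.headD []).map Prod.fst)
instance (data : List (List (String × String))) (keys : Option (List String)) (single : Bool) : Decidable (Pre_fold_row_major data keys single) := by unfold Pre_fold_row_major; infer_instance

def pvWitness_fold_row_major : (List (List (String × String))) × Option (List String) × Bool :=
  ([[("a", "1"), ("b", "2")], [("a", "1"), ("c", "3")]], none, false)

def Spec_fold_row_major (data : List (List (String × String))) (keys : Option (List String)) (single : Bool) (out : (List (List (String × String))) × (List (String × String))) : Prop := out = fold_row_major_alt data keys single
instance (data : List (List (String × String))) (keys : Option (List String)) (single : Bool) (out : (List (List (String × String))) × (List (String × String))) : Decidable (Spec_fold_row_major data keys single out) := by unfold Spec_fold_row_major; infer_instance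

-- ===== CLAIM (what is proved, stated in full; the proofs are below) =====
def Claim_equal_fold_row_major : Prop := ∀ (data : List (List (String × String))) (keys : Option (List String)) (single : Bool), Dom_fold_row_major data keys single → Pre_fold_row_major data keys single → Spec_fold_row_major data keys single (fold_row_major data keys single)

-- ===== LEMMAS AND PROOFS =====

theorem pyLookup_of_mem {l : List (String × String)} {p : String × String}
    (hp : p ∈ l) (hnd : (l.map Prod.fst).Nodup) : pyLookup? l p.1 = some p.2 := by
  induction l with
  | nil => cases hp
  | cons q l ih =>
    simp only [List.map_cons, List.nodup_cons] at hnd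
    rcases List.mem_cons.mp hp with rfl | hp'
    · simp [pyLookup?]
    · have hne : (q.1 == p.1) = false := by
        rw [beq_eq_false_iff_ne]
        intro h
        exact hnd.1 (h ▸ List.mem_map_of_mem hp')
      have := ih hp' hnd.2
      simpa [pyLookup?, List.find?_cons, hne] using this

theorem foldl_insert_items (f : String → String) (C : String → Prop) :
    ∀ (ks : List String) (d : PySem.Dict String String),
      (∀ k ∈ ks, C k) → (∀ p ∈ d.items, p.2 = f p.1 ∧ C p.1) →
      ∀ p ∈ (ks.foldl (fun d k => d.insert k (f k)) d).items, p.2 = f p.1 ∧ C p.1 := by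
  intro ks
  induction ks with
  | nil => intro d _ hd; simpa using hd
  | cons k ks ih =>
    intro d hks hd
    rw [List.foldl_cons]
    refine ih _ (fun a ha => hks a (List.mem_cons_of_mem _ ha)) ?_
    intro p hp
    rcases (PySem.Dict.mem_items_insert _ _ _ _).mp hp with rfl | ⟨hp', _⟩
    · exact ⟨rfl, hks k (List.mem_cons_self ..)⟩
    · exact hd p hp'

theorem items_erase (m : PySem.Dict String String) (k : String) :
    (m.erase k).items = m.items.filter (fun p => !(p.1 == k)) := rfl

theorem inner_fold (it : List (String × String)) :
    ∀ (ks : List String) (m : PySem.Dict String String),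
      (m.items.map Prod.fst).Nodup →
      (ks.foldl (fun m' key =>
        if !(it.any (fun p => p.1 == key)) || (m'.get? key != pyLookup? it key)
        then m'.erase key else m') m).items
      = m.items.filter (fun p => !(ks.contains p.1) || (pyLookup? it p.1 == some p.2)) := by
  intro ks
  induction ks with
  | nil => intro m _; simp
  | cons k ks ih =>
    intro m hmnd
    rw [List.foldl_cons]
    have hkeys : m.keys.Nodup := by simpa [PySem.Dict.keys] using hmnd
    by_cases hc : (!(it.any (fun p => p.1 == k)) || (m.get? k != pyLookup? it k)) = true
    · rw [if_pos hc]
      have hnd' : ((m.erase k).items.map Prod.fst).Nodup := by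
        rw [items_erase]
        exact (hmnd.sublist (List.filter_sublist.map _))
      rw [ih _ hnd', items_erase, List.filter_filter]
      apply List.filter_congr
      intro p hp
      by_cases hpk : p.1 = k
      · have hget : m.get? p.1 = some p.2 := PySem.Dict.get?_of_mem_items _ (by simpa using hp) hkeys
        have hgood : (pyLookup? it p.1 == some p.2) = false := by
          rcases Bool.or_eq_true_iff.mp hc with h | h
          · have : it.any (fun p => p.1 == k) = false := by simpa using h
            have hnone : pyLookup? it p.1 = none := by
              simp only [pyLookup?, Option.map_eq_none_iff, List.find?_eq_none]
              intro x hx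
              have := List.any_eq_false.mp this x hx
              simpa [hpk] using this
            simp [hnone]
          · rw [bne_iff_ne] at h
            rw [beq_eq_false_iff_ne]
            intro heq
            exact h (by rw [hpk] at hget heq; rw [hget, heq])
        rw [hpk] at hgood; simp [hpk, hgood]
      · simp [hpk, Bool.and_comm]
    · rw [if_neg hc]
      rw [ih _ hmnd]
      apply List.filter_congr
      intro p hp
      by_cases hpk : p.1 = k
      · have hget : m.get? p.1 = some p.2 := PySem.Dict.get?_of_mem_items _ (by simpa using hp) hkeys
        have hc' := hc
        simp only [Bool.or_eq_true_iff, not_or, Bool.not_eq_true] at hc'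
        have heq : m.get? k = pyLookup? it k := by
          have := hc'.2
          simpa [bne_eq_false_iff_eq] using this
        have hgood : (pyLookup? it p.1 == some p.2) = true := by
          rw [beq_iff_eq, hpk, ← heq, ← hpk, hget]
        rw [hpk] at hgood; simp [hpk, hgood]
      · simp [hpk]

theorem outer_fold :
    ∀ (rest : List (List (String × String))) (m : PySem.Dict String String),
      (m.items.map Prod.fst).Nodup →
      (rest.foldl (fun m it =>
        m.keys.foldl (fun m' key =>
          if !(it.any (fun p => p.1 == key)) || (m'.get? key != pyLookup? it key)
          then m'.erase key else m') m) m).items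
      = m.items.filter (fun p => rest.all (fun i => pyLookup? i p.1 == some p.2)) := by
  intro rest
  induction rest with
  | nil => intro m _; simp
  | cons it rest ih =>
    intro m hmnd
    rw [List.foldl_cons]
    have hstep : (m.keys.foldl (fun m' key =>
        if !(it.any (fun p => p.1 == key)) || (m'.get? key != pyLookup? it key)
        then m'.erase key else m') m).items
        = m.items.filter (fun p => pyLookup? it p.1 == some p.2) := by
      rw [inner_fold it m.keys m hmnd]
      apply List.filter_congr
      intro p hp
      have hmem : p.1 ∈ m.keys := by
        simp only [PySem.Dict.keys]
        exact List.mem_map_of_mem hp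
      simp [hmem]
    have hnd1 : (((m.keys.foldl (fun m' key =>
        if !(it.any (fun p => p.1 == key)) || (m'.get? key != pyLookup? it key)
        then m'.erase key else m') m)).items.map Prod.fst).Nodup := by
      rw [hstep]
      exact hmnd.sublist (List.filter_sublist.map _)
    rw [ih _ hnd1, hstep, List.filter_filter]
    apply List.filter_congr
    intro p hp
    simp [Bool.and_comm]

theorem seed_good (item : List (String × String)) (keys : Option (List String))
    (hnd : (item.map Prod.fst).Nodup)
    (hk : ∀ k ∈ keys.getD [], k ∈ item.map Prod.fst) :
    ∀ p ∈ (match keys with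
           | none => PySem.Dict.mk item
           | some ks => ks.foldl (fun d k => d.insert k ((pyLookup? item k).getD "")) PySem.Dict.empty).items,
      pyLookup? item p.1 = some p.2 := by
  cases keys with
  | none => exact fun p hp => pyLookup_of_mem hp hnd
  | some ks =>
    intro p hp
    have h := foldl_insert_items (fun k => (pyLookup? item k).getD "")
      (fun k => k ∈ item.map Prod.fst) ks PySem.Dict.empty (by simpa using hk)
      (by intro p hp; cases hp) p hp
    obtain ⟨q, hq, hq1⟩ := List.mem_map.mp h.2
    cases hfind : item.find? (fun r => r.1 == p.1) with
    | none =>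
      have := List.find?_eq_none.mp hfind q hq
      simp [hq1] at this
    | some r =>
      have : pyLookup? item p.1 = some r.2 := by simp [pyLookup?, hfind]
      rw [this, h.1]
      simp [this]

theorem seed_nodup (item : List (String × String)) (keys : Option (List String))
    (hnd : (item.map Prod.fst).Nodup) :
    ((match keys with
      | none => PySem.Dict.mk item
      | some ks => ks.foldl (fun d k => d.insert k ((pyLookup? item k).getD "")) PySem.Dict.empty).items.map Prod.fst).Nodup := by
  cases keys with
  | none => simpa using hnd
  | some ks =>
    have gen : ∀ (l : List String) (d : PySem.Dict String String), d.keys.Nodup →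
        (l.foldl (fun d k => d.insert k ((pyLookup? item k).getD "")) d).keys.Nodup := by
      intro l
      induction l with
      | nil => intro d hd; simpa using hd
      | cons k l ih => intro d hd; exact ih _ (PySem.Dict.nodup_keys_insert d k _ hd)
    have := gen ks PySem.Dict.empty PySem.Dict.nodup_keys_empty
    simpa [PySem.Dict.keys] using this

-- the seed fold over the keys list yields the first-occurrence-deduplicated key list, paired with f
theorem foldl_insert_eq (f : String → String) :
    ∀ (ks : List String) (d : PySem.Dict String String) (seen : List String),
      d.keys.Nodup → (∀ p ∈ d.items, p.2 = f p.1) →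
      (∀ x, seen.contains x = d.contains x) →
      (ks.foldl (fun d k => d.insert k (f k)) d).items
        = d.items ++ (pyFromKeysAux seen ks).map (fun k => (k, f k)) := by
  intro ks
  induction ks with
  | nil => intro d seen _ _ _; simp [pyFromKeysAux]
  | cons k ks ih =>
    intro d seen hnd hval hseen
    rw [List.foldl_cons]
    by_cases hc : d.contains k = true
    · have hins : d.insert k (f k) = d := by
        apply PySem.Dict.ext
        rw [PySem.Dict.items_insert_of_contains _ _ hc]
        have hid : List.map (fun p => if (p.1 == k) = true then (k, f k) else p) d.items
            = List.map id d.items := by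
          apply List.map_congr_left
          intro p hp
          by_cases hpk : (p.1 == k) = true
          · have h1 : p.1 = k := eq_of_beq hpk
            have h2 := hval p hp
            rw [if_pos hpk]
            cases p
            simp_all
          · rw [if_neg (by simp [hpk])]; rfl
        rw [hid, List.map_id]
      rw [hins, ih d seen hnd hval hseen]
      have hmem : k ∈ seen := by
        have : seen.contains k = true := by rw [hseen]; exact hc
        simpa using this
      simp [pyFromKeysAux, hmem]
    · have hnd' : (d.insert k (f k)).keys.Nodup := PySem.Dict.nodup_keys_insert d k _ hnd
      have hitems' : (d.insert k (f k)).items = d.items ++ [(k, f k)] :=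
        PySem.Dict.items_insert_of_not_contains _ _ (by simpa using hc)
      have hval' : ∀ p ∈ (d.insert k (f k)).items, p.2 = f p.1 := by
        intro p hp
        rcases (PySem.Dict.mem_items_insert _ _ _ _).mp hp with rfl | ⟨hp', _⟩
        · rfl
        · exact hval p hp'
      have hseen' : ∀ x, (k :: seen).contains x = (d.insert k (f k)).contains x := by
        intro x
        rw [PySem.Dict.contains_insert]
        simp only [List.contains_cons, hseen x]
      rw [ih _ _ hnd' hval' hseen', hitems']
      have hmem : k ∉ seen := by
        have : seen.contains k = false := by rw [hseen]; simpa using hc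
        simpa using this
      simp [pyFromKeysAux, hmem]

-- ===== VERDICT (by name: the statement is the Claim_ definition above) =====
theorem fold_row_major_spec : Claim_equal_fold_row_major := by
  intro data keys single _ hpre
  unfold Spec_fold_row_major fold_row_major fold_row_major_alt
  by_cases hg : data.length = 0 ∨ (data.length = 1 ∧ single = false)
  · rw [if_pos hg, if_pos hg]
  · rw [if_neg hg, if_neg hg]
    cases data with
    | nil => exact absurd (Or.inl rfl) hg
    | cons item rest =>
      have hndi : (item.map Prod.fst).Nodup := hpre.1 item (List.mem_cons_self ..)
      simp only [List.headD_cons, List.drop_succ_cons, List.drop_zero]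
      have hk : ∀ k ∈ keys.getD [], k ∈ item.map Prod.fst := by
        rcases hpre.2 with h | h | h | h
        · subst h; simp
        · simp at h
        · exact absurd (Or.inr h) hg
        · simpa using h
      have hnd := seed_nodup item keys hndi
      have hgood := seed_good item keys hndi hk
      have houter := outer_fold rest _ hnd
      -- align A's meta items with B's common-key pipeline
      cases keys with
      | none =>
        have hitems : (PySem.Dict.mk item).items = item := by simp
        rw [hitems] at houter hgood
        have hmeta : (item.filter (fun p => rest.all (fun i => pyLookup? i p.1 == some p.2)))
            = ((item.map Prod.fst).filter
                (fun k => rest.all (fun i => pyLookup? i k == pyLookup? item k))).map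
                (fun k => (k, (pyLookup? item k).getD "")) := by
          rw [List.filter_map, List.map_map]
          have h1 : item.filter ((fun k => rest.all (fun i => pyLookup? i k == pyLookup? item k)) ∘ Prod.fst)
              = item.filter (fun p => rest.all (fun i => pyLookup? i p.1 == some p.2)) := by
            apply List.filter_congr
            intro p hp
            simp only [Function.comp_apply]
            rw [pyLookup_of_mem hp hndi]
          rw [h1]
          symm
          have hid : List.map ((fun k => (k, (pyLookup? item k).getD "")) ∘ Prod.fst)
              (item.filter (fun p => rest.all (fun i => pyLookup? i p.1 == some p.2)))
              = List.map id (item.filter (fun p => rest.all (fun i => pyLookup? i p.1 == some p.2))) := by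
            apply List.map_congr_left
            intro p hp
            have := pyLookup_of_mem (List.mem_of_mem_filter hp) hndi
            simp [this]
          rw [hid, List.map_id]
        rw [houter, hmeta]
        have hcont : ∀ x, (PySem.Dict.contains
              (rest.foldl (fun m it =>
                m.keys.foldl (fun m' key =>
                  if !(it.any (fun p => p.1 == key)) || (m'.get? key != pyLookup? it key)
                  then m'.erase key else m') m) (PySem.Dict.mk item)) x)
            = ((item.map Prod.fst).filter
                (fun k => rest.all (fun i => pyLookup? i k == pyLookup? item k))).contains x := by
          intro x
          rw [Bool.eq_iff_iff, PySem.Dict.contains_iff_mem_keys]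
          have houter' := houter
          simp only [PySem.Dict.keys] at houter' ⊢
          rw [houter', hmeta, List.map_map]
          simp [List.mem_filter]
        simp only [hcont]
      | some ks =>
        have hseed : (ks.foldl (fun d k => d.insert k ((pyLookup? item k).getD "")) PySem.Dict.empty).items
            = (pyFromKeys ks).map (fun k => (k, (pyLookup? item k).getD "")) := by
          have := foldl_insert_eq (fun k => (pyLookup? item k).getD "") ks PySem.Dict.empty []
            PySem.Dict.nodup_keys_empty (by intro p hp; cases hp)
            (by intro x; simp [PySem.Dict.contains_empty])
          simpa [pyFromKeys] using this
        rw [hseed] at houter hgood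
        have hmeta : (((pyFromKeys ks).map (fun k => (k, (pyLookup? item k).getD ""))).filter
              (fun p => rest.all (fun i => pyLookup? i p.1 == some p.2)))
            = ((pyFromKeys ks).filter
                (fun k => rest.all (fun i => pyLookup? i k == pyLookup? item k))).map
                (fun k => (k, (pyLookup? item k).getD "")) := by
          rw [List.filter_map]
          congr 1
          apply List.filter_congr
          intro k hkk
          have hg2 := hgood (k, (pyLookup? item k).getD "")
            (List.mem_map_of_mem hkk)
          dsimp only at hg2 ⊢
          rw [hg2]
          simp only [Function.comp_apply]
        rw [houter, hmeta]
        have hcont : ∀ x, (PySem.Dict.contains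
              (rest.foldl (fun m it =>
                m.keys.foldl (fun m' key =>
                  if !(it.any (fun p => p.1 == key)) || (m'.get? key != pyLookup? it key)
                  then m'.erase key else m')
                m) (ks.foldl (fun d k => d.insert k ((pyLookup? item k).getD "")) PySem.Dict.empty)) x)
            = ((pyFromKeys ks).filter
                (fun k => rest.all (fun i => pyLookup? i k == pyLookup? item k))).contains x := by
          intro x
          rw [Bool.eq_iff_iff, PySem.Dict.contains_iff_mem_keys]
          have houter' := houter
          simp only [PySem.Dict.keys] at houter' ⊢
          rw [houter', hmeta, List.map_map]
          simp [List.mem_filter]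
        simp only [hcont]
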